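-- pv_equiv track=rewrite | github.com/y-ann/aoc2023 | day3/part2.py | detect_numbers
-- ===== SOURCE A (Python) =====
-- def detect_numbers(input: list[str]) -> list[tuple[int, int, int, int]]:
--     result = []
--     for i, row in enumerate(input):
--         current_number = ""
--         for j, char in enumerate(row):
--             if char.isdigit():
--                 current_number += char
--                 last_char = j + 1 == len(row)
--                 if last_char or not row[j + 1].isdigit():
--                     result.append(
--                         (int(current_number), i, j + 1 - len(current_number), j + 1)
--                     )
--                     current_number = ""
--     return result
-- ===== SOURCE B (Python) =====
-- def detect_numbers(input: list[str]) -> list[tuple[int, int, int, int]]: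
--     result = []
--     for i, row in enumerate(input):
--         j = 0
--         n = len(row)
--         while j < n:
--             if row[j].isdigit():
--                 k = j
--                 while k < n and row[k].isdigit():
--                     k += 1
--                 result.append((int(row[j:k]), i, j, k))
--                 j = k
--             else:
--                 j += 1
--     return result
-- ===== Notes on version B (the rewrite author's own statement) =====
-- stated objective: simpler
-- what changed: Replaced A's per-character state machine (running current_number accumulator with a row[j+1] lookahead and flush) by a two-pointer scan that finds each maximal digit run [j,k) and emits int(row[j:k]) directly.
import Mathlib
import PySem

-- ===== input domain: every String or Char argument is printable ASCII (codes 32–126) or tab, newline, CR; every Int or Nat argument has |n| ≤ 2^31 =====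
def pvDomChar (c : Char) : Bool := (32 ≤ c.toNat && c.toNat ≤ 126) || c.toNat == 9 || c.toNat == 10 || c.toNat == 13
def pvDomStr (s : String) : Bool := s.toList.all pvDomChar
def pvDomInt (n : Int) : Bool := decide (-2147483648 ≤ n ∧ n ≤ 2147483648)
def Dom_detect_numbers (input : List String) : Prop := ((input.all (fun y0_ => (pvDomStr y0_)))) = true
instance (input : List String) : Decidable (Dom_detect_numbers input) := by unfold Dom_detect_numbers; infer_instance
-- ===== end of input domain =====

-- B replaces A's running-accumulator/lookahead state machine with a two-pointer scan that
-- extracts each maximal digit run by slicing (objective: simpler decomposition, same cost).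

-- int(s) where s is always a nonempty run of ASCII digits on Dom: ofChars? never returns none there,
-- so the .getD 0 default is unreachable (exact on the admitted domain).
def pvInt (cs : List Char) : Int := (PySem.Int.ofChars? cs).getD 0

-- ===== PORT A =====
-- inner loop: 'for j, char in enumerate(row)' as structural recursion on the index j,
-- carrying A's state (current_number = cur, result = res); row[j+1] is read via pyGetD,
-- only reached (as in Python, by short-circuit) when j+1 < len(row).
def pvLoopA (i : Int) (row : List Char) (j : Nat) (cur : List Char)
    (res : List (Int × Int × Int × Int)) : List (Int × Int × Int × Int) :=
  if h : j < row.length then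
    let c := row[j]
    if PySem.Chars.isdigit c then
      let cur' := cur ++ [c]
      if (j + 1 == row.length) || !(PySem.Chars.isdigit (PySem.List.pyGetD row ((j : Int) + 1) ' ')) then
        pvLoopA i row (j + 1) []
          (res ++ [(pvInt cur', i, ((j : Int) + 1) - (cur'.length : Int), (j : Int) + 1)])
      else
        pvLoopA i row (j + 1) cur' res
    else
      pvLoopA i row (j + 1) cur res
  else res
termination_by row.length - j

def detect_numbers (input : List String) : List (Int × Int × Int × Int) :=
  (PySem.List.enumerate input 0).foldl (fun res p => pvLoopA p.1 p.2.toList 0 [] res) []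

-- ===== PORT B =====
-- 'while k < n and row[k].isdigit(): k += 1'
def pvScan (row : List Char) (k : Nat) : Nat :=
  if h : k < row.length then
    if PySem.Chars.isdigit row[k] then pvScan row (k + 1) else k
  else k
termination_by row.length - k
decreasing_by omega

theorem le_pvScan (row : List Char) (k : Nat) : k ≤ pvScan row k := by
  rw [pvScan]
  split
  · split
    · exact le_trans (by omega) (le_pvScan row (k + 1))
    · exact le_refl k
  · exact le_refl k
termination_by row.length - k
decreasing_by omega

-- outer 'while j < n' loop of B
def pvLoopB (i : Int) (row : List Char) (j : Nat) : List (Int × Int × Int × Int) :=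
  if h : j < row.length then
    if hd : PySem.Chars.isdigit row[j] then
      let k := pvScan row j
      (pvInt (PySem.List.slice row (some (j : Int)) (some (k : Int))), i, (j : Int), (k : Int))
        :: pvLoopB i row k
    else
      pvLoopB i row (j + 1)
  else []
termination_by row.length - j
decreasing_by
  · have hk : j + 1 ≤ pvScan row j := by
      rw [pvScan, dif_pos h, if_pos hd]; exact le_pvScan row (j + 1)
    omega
  · omega

def detect_numbers_alt (input : List String) : List (Int × Int × Int × Int) :=
  (PySem.List.enumerate input 0).foldl (fun res p => res ++ pvLoopB p.1 p.2.toList 0) []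

-- ===== PRECONDITION & SPEC =====
def Spec_detect_numbers (input : List String) (out : List (Int × Int × Int × Int)) : Prop := out = detect_numbers_alt input
instance (input : List String) (out : List (Int × Int × Int × Int)) : Decidable (Spec_detect_numbers input out) := by unfold Spec_detect_numbers; infer_instance

-- ===== CLAIM (what is proved, stated in full; the proofs are below) =====
def Claim_equal_detect_numbers : Prop := ∀ (input : List String), Dom_detect_numbers input → Spec_detect_numbers input (detect_numbers input)

-- ===== LEMMAS AND PROOFS =====

theorem pvScan_stop_len (row : List Char) (k : Nat)
    (h : ¬ k < row.length) : pvScan row k = k := by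
  rw [pvScan, dif_neg h]

theorem pvScan_stop_digit (row : List Char) (k : Nat)
    (h : k < row.length) (hd : PySem.Chars.isdigit (row[k]'h) = false) : pvScan row k = k := by
  rw [pvScan, dif_pos h, if_neg (by simp [hd])]

theorem pvScan_step (row : List Char) (k : Nat)
    (h : k < row.length) (hd : PySem.Chars.isdigit (row[k]'h) = true) :
    pvScan row k = pvScan row (k + 1) := by
  rw [pvScan, dif_pos h, if_pos hd]

theorem take_one_drop (l : List Char) (j : Nat) (h : j < l.length) :
    (l.drop j).take 1 = [l[j]] := by
  rw [List.drop_eq_getElem_cons h]; rfl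

-- the key per-row lemma: A's state machine from index j with pending digits cur
-- equals res ++ (B's run scan from j), with the partially-read run flushed in front.
theorem loopA_eq_loopB (i : Int) (row : List Char) :
    ∀ (d j : Nat) (cur : List Char) (res : List (Int × Int × Int × Int)),
    row.length ≤ j + d → j ≤ row.length →
    (cur = [] ∨ (j < row.length ∧ PySem.Chars.isdigit (row.getD j ' ') = true)) →
    pvLoopA i row j cur res =
      res ++ (if cur = [] then pvLoopB i row j
              else (pvInt (cur ++ (row.drop j).take (pvScan row j - j)), i,
                    (j : Int) - (cur.length : Int), ((pvScan row j : Nat) : Int))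
                   :: pvLoopB i row (pvScan row j)) := by
  intro d
  induction d with
  | zero =>
    intro j cur res hle hj hcur
    have hjn : j = row.length := by omega
    have hc : cur = [] := by
      rcases hcur with h | h
      · exact h
      · omega
    subst hc
    rw [pvLoopA, dif_neg (by omega), if_pos rfl, pvLoopB, dif_neg (by omega)]
    simp
  | succ d ih =>
    intro j cur res hle hj hcur
    by_cases hjn : j < row.length
    · by_cases hd : PySem.Chars.isdigit (row[j]'hjn) = true
      · -- current char is a digit
        have hget : PySem.List.pyGetD row ((j : Int) + 1) ' ' = row.getD (j + 1) ' ' := by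
          have hcast : ((j : Int) + 1) = (((j + 1 : Nat)) : Int) := by push_cast; ring
          rw [hcast, PySem.List.pyGetD_natCast]
        have hdrop : row.drop j = (row[j]'hjn) :: row.drop (j + 1) :=
          List.drop_eq_getElem_cons hjn
        by_cases hlast : j + 1 = row.length
        · -- flush: last char of the row
          have hk : pvScan row j = j + 1 := by
            rw [pvScan_step row j hjn hd, pvScan_stop_len row (j + 1) (by omega)]
          have hcond : ((j + 1 == row.length) || !(PySem.Chars.isdigit (PySem.List.pyGetD row ((j : Int) + 1) ' '))) = true := by
            simp [hlast]
          rw [pvLoopA, dif_pos hjn]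
          simp only [hd, if_true, hcond]
          rw [ih (j + 1) [] _ (by omega) (by omega) (Or.inl rfl), if_pos rfl]
          have h1 : j + 1 - j = 1 := by omega
          rcases eq_or_ne cur [] with hc | hc
          · subst hc
            rw [if_pos rfl]
            conv_rhs => rw [pvLoopB]
            rw [dif_pos hjn, dif_pos hd]
            simp only [hk, PySem.List.slice_natCast, h1, take_one_drop row j hjn]
            simp [List.append_assoc]
            try push_cast
            try omega
          · rw [if_neg hc]
            simp only [hk, h1, take_one_drop row j hjn]
            simp [List.append_assoc]
            try push_cast
            try omega
        · by_cases hd2 : PySem.Chars.isdigit (row.getD (j + 1) ' ') = true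
          · -- no flush: next char also a digit
            have hj1 : j + 1 < row.length := by omega
            have hgd : row.getD (j + 1) ' ' = row[j + 1]'hj1 := List.getD_eq_getElem row ' ' hj1
            have hk : pvScan row j = pvScan row (j + 1) := pvScan_step row j hjn hd
            have hcond : ((j + 1 == row.length) || !(PySem.Chars.isdigit (PySem.List.pyGetD row ((j : Int) + 1) ' '))) = false := by
              rw [hget, hd2]; simp [hlast]
            rw [pvLoopA, dif_pos hjn]
            simp only [hd, if_true, hcond, Bool.false_eq_true, if_false]
            rw [ih (j + 1) (cur ++ [row[j]'hjn]) res (by omega) (by omega)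
              (Or.inr ⟨hj1, hd2⟩), if_neg (by simp)]
            rw [← hk]
            have hge : j + 1 ≤ pvScan row j := by rw [hk]; exact le_pvScan row (j + 1)
            have htake : List.take (pvScan row j - j) (List.drop j row)
                = (row[j]'hjn) :: List.take (pvScan row j - (j + 1)) (List.drop (j + 1) row) := by
              rw [hdrop]
              have h2 : pvScan row j - j = (pvScan row j - (j + 1)) + 1 := by omega
              rw [h2, List.take_succ_cons]
            rcases eq_or_ne cur [] with hc | hc
            · subst hc
              rw [if_pos rfl]
              conv_rhs => rw [pvLoopB]
              rw [dif_pos hjn, dif_pos hd]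
              simp only [PySem.List.slice_natCast, htake]
              simp
              try push_cast
              try omega
            · rw [if_neg hc]
              simp only [htake]
              simp [List.append_assoc]
              try push_cast
              try omega
          · -- flush: next char not a digit
            have hj1 : j + 1 < row.length := by omega
            have hgd : row.getD (j + 1) ' ' = row[j + 1]'hj1 := List.getD_eq_getElem row ' ' hj1
            have hk : pvScan row j = j + 1 := by
              rw [pvScan_step row j hjn hd]
              exact pvScan_stop_digit row (j + 1) hj1 (by rw [← hgd]; simpa using hd2)
            have hd2' : PySem.Chars.isdigit (row.getD (j + 1) ' ') = false :=
              Bool.not_eq_true _ ▸ eq_false_of_ne_true hd2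
            have hcond : ((j + 1 == row.length) || !(PySem.Chars.isdigit (PySem.List.pyGetD row ((j : Int) + 1) ' '))) = true := by
              rw [hget, hd2']; simp
            rw [pvLoopA, dif_pos hjn]
            simp only [hd, if_true, hcond]
            rw [ih (j + 1) [] _ (by omega) (by omega) (Or.inl rfl), if_pos rfl]
            have h1 : j + 1 - j = 1 := by omega
            rcases eq_or_ne cur [] with hc | hc
            · subst hc
              rw [if_pos rfl]
              conv_rhs => rw [pvLoopB]
              rw [dif_pos hjn, dif_pos hd]
              simp only [hk, PySem.List.slice_natCast, h1, take_one_drop row j hjn]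
              simp [List.append_assoc]
              try push_cast
              try omega
            · rw [if_neg hc]
              simp only [hk, h1, take_one_drop row j hjn]
              simp [List.append_assoc]
              try push_cast
              try omega
      · -- not a digit: cur must be empty
        have hc : cur = [] := by
          rcases hcur with h | h
          · exact h
          · exact absurd (by rw [List.getD_eq_getElem row ' ' hjn] at h; exact h.2) hd
        subst hc
        rw [pvLoopA, dif_pos hjn, if_neg (by simpa using hd), if_pos rfl,
          pvLoopB, dif_pos hjn, dif_neg (by simpa using hd)]
        have := ih (j + 1) [] res (by omega) (by omega) (Or.inl rfl)
        rw [if_pos rfl] at this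
        exact this
    · -- j = row.length
      have hc : cur = [] := by
        rcases hcur with h | h
        · exact h
        · omega
      subst hc
      rw [pvLoopA, dif_neg hjn, if_pos rfl, pvLoopB, dif_neg hjn]
      simp

theorem row_eq (i : Int) (r : List Char) (res : List (Int × Int × Int × Int)) :
    pvLoopA i r 0 [] res = res ++ pvLoopB i r 0 := by
  have h := loopA_eq_loopB i r r.length 0 [] res (by omega) (by omega) (Or.inl rfl)
  rwa [if_pos rfl] at h

theorem detect_numbers_spec : Claim_equal_detect_numbers := by
  intro input _
  unfold Spec_detect_numbers detect_numbers detect_numbers_alt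
  simp only [row_eq]
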